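-- pv_equiv track=rewrite | github.com/llf-970310/expression-question | manager/wordbase_manager.py | __duplication_removal_single
-- ===== SOURCE A (Python) =====
-- def __duplication_removal_single(word_list):
--     remove_index = []
--     result = []
--     length = len(word_list)
--     for i in range(length):
--         for j in range(i + 1, length):
--             if word_list[i] in word_list[j]:
--                 remove_index.append(i)
--             elif word_list[j] in word_list[i]:
--                 remove_index.append(j)
--     for i in range(length):
--         if i not in remove_index:
--             result.append(word_list[i])
--     return result
-- ===== SOURCE B (Python) =====
-- def __duplication_removal_single(word_list):
--     # Keep a word iff no other (longer) word strictly contains it and it is the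
--     # last occurrence of its value; scan right-to-left with a seen-set.
--     seen = set()
--     kept = []
--     for i in range(len(word_list) - 1, -1, -1):
--         w = word_list[i]
--         if w not in seen and not any(w in v and len(v) > len(w) for v in word_list):
--             kept.append(w)
--         seen.add(w)
--     kept.reverse()
--     return kept
-- ===== Notes on version B (the rewrite author's own statement) =====
-- stated objective: faster
-- what changed: Instead of a pairwise double loop that accumulates a remove_index list and then rescans it with O(|remove_index|) list membership per element, B does one right-to-left pass keeping a word iff it is the last occurrence of its value (O(1) set lookup) and no strictly longer word in the list contains it (short-circuiting any()).
import Mathlib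
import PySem

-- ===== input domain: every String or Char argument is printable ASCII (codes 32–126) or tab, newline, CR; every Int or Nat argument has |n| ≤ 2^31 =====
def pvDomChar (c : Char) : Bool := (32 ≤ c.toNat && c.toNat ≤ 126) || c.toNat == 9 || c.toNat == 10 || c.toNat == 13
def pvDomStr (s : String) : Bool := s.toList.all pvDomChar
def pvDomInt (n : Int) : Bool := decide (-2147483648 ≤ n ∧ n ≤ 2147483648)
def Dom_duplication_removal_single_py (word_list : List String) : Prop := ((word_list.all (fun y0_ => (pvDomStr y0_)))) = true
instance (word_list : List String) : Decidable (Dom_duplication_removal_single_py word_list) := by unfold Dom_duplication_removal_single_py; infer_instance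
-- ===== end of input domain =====

-- B replaces A's pairwise remove_index accumulation (rescanned by list membership) with one
-- right-to-left pass: keep the last occurrence of a word iff no strictly longer word contains it.

-- ===== PORT A =====
def duplication_removal_single_py (word_list : List String) : List String :=
  let length : Int := word_list.length
  let remove_index : List Int :=
    (PySem.List.pyRange 0 length 1).foldl (fun ri i =>
      (PySem.List.pyRange (i + 1) length 1).foldl (fun ri j =>
        if PySem.Str.isIn (PySem.List.pyGetD word_list i "") (PySem.List.pyGetD word_list j "") then
          ri ++ [i]
        else if PySem.Str.isIn (PySem.List.pyGetD word_list j "") (PySem.List.pyGetD word_list i "") then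
          ri ++ [j]
        else ri) ri) []
  (PySem.List.pyRange 0 length 1).foldl (fun res i =>
    if i ∈ remove_index then res else res ++ [PySem.List.pyGetD word_list i ""]) []

-- ===== PORT B =====
def duplication_removal_single_py_alt (word_list : List String) : List String :=
  let st :=
    (PySem.List.pyRange ((word_list.length : Int) - 1) (-1) (-1)).foldl
      (fun (st : List String × PySem.Set String) i =>
        let w := PySem.List.pyGetD word_list i ""
        (if !(st.2.contains w) &&
            !(word_list.any fun v => PySem.Str.isIn w v && decide (PySem.Str.len w < PySem.Str.len v))
         then st.1 ++ [w] else st.1,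
         st.2.add w))
      ([], PySem.Set.empty)
  st.1.reverse

-- ===== PRECONDITION & SPEC =====
def Spec_duplication_removal_single_py (word_list : List String) (out : List String) : Prop := out = duplication_removal_single_py_alt word_list
instance (word_list : List String) (out : List String) : Decidable (Spec_duplication_removal_single_py word_list out) := by unfold Spec_duplication_removal_single_py; infer_instance

-- ===== CLAIM (what is proved, stated in full; the proofs are below) =====
def Claim_equal_duplication_removal_single_py : Prop := ∀ (word_list : List String), Dom_duplication_removal_single_py word_list → Spec_duplication_removal_single_py word_list (duplication_removal_single_py word_list)

-- ===== LEMMAS AND PROOFS =====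

-- word at a Nat index (default "")
def pvW (ws : List String) (i : Nat) : String := ws.getD i ""

-- "some strictly longer word of ws contains word i" — the `any` test of B
def pvBig (ws : List String) (i : Nat) : Bool :=
  ws.any fun v => PySem.Str.isIn (pvW ws i) v && decide (PySem.Str.len (pvW ws i) < PySem.Str.len v)

-- "word i occurs again at a later index j < m"
def pvDup (ws : List String) (i m : Nat) : Bool :=
  (List.range m).any fun j => decide (i < j) && (pvW ws j == pvW ws i)

-- what A's inner-loop body appends for the pair (i, j)
def pvG (ws : List String) (i j : Int) : List Int :=
  if PySem.Str.isIn (PySem.List.pyGetD ws i "") (PySem.List.pyGetD ws j "") then [i]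
  else if PySem.Str.isIn (PySem.List.pyGetD ws j "") (PySem.List.pyGetD ws i "") then [j]
  else []

-- A's remove_index as a flatMap
def pvRI (ws : List String) : List Int :=
  (PySem.List.pyRange 0 (ws.length : Int) 1).flatMap (fun i =>
    (PySem.List.pyRange (i + 1) (ws.length : Int) 1).flatMap (pvG ws i))

-- "index i gets marked by A" — by a later containing word, or an earlier strictly containing one
def pvRemB (ws : List String) (i : Nat) : Bool :=
  ((List.range ws.length).any fun j => decide (i < j) && PySem.Str.isIn (pvW ws i) (pvW ws j)) ||
  ((List.range ws.length).any fun j => decide (j < i) && PySem.Str.isIn (pvW ws i) (pvW ws j)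
      && !(PySem.Str.isIn (pvW ws j) (pvW ws i)))


lemma pvW_eq (ws : List String) (a : Int) (h0 : 0 ≤ a) (hn : a < (ws.length : Int)) :
    PySem.List.pyGetD ws a "" = pvW ws a.toNat := by
  rw [PySem.List.pyGetD_eq_getElem ws "" h0 hn, pvW, List.getD_eq_getElem ws "" (by omega)]

lemma pvRemB_iff (ws : List String) (i : Nat) :
    pvRemB ws i = true ↔
      (∃ j, i < j ∧ j < ws.length ∧ PySem.Str.isIn (pvW ws i) (pvW ws j) = true) ∨
      (∃ j, j < i ∧ j < ws.length ∧ PySem.Str.isIn (pvW ws i) (pvW ws j) = true ∧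
        PySem.Str.isIn (pvW ws j) (pvW ws i) = false) := by
  simp only [pvRemB, Bool.or_eq_true, List.any_eq_true, List.mem_range, Bool.and_eq_true,
    decide_eq_true_eq, Bool.not_eq_true']
  constructor
  · rintro (⟨j, hjn, hij, h1⟩ | ⟨j, hjn, ⟨hji, h1⟩, h2⟩)
    · exact Or.inl ⟨j, hij, hjn, h1⟩
    · exact Or.inr ⟨j, hji, hjn, h1, h2⟩
  · rintro (⟨j, hij, hjn, h1⟩ | ⟨j, hji, hjn, h1, h2⟩)
    · exact Or.inl ⟨j, hjn, hij, h1⟩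
    · exact Or.inr ⟨j, hjn, ⟨hji, h1⟩, h2⟩

lemma pvRI_mem (ws : List String) (i : Nat) (hi : i < ws.length) :
    ((i : Int) ∈ pvRI ws) ↔ pvRemB ws i = true := by
  rw [pvRemB_iff]
  constructor
  · intro h
    simp only [pvRI, List.mem_flatMap, PySem.List.mem_pyRange_one] at h
    obtain ⟨a, ⟨ha0, han⟩, b, ⟨hab, hbn⟩, hm⟩ := h
    rw [pvG, pvW_eq ws a ha0 (by omega), pvW_eq ws b (by omega) (by omega)] at hm
    split_ifs at hm with h1 h2
    · -- hm : (i : Int) ∈ [a]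
      simp only [List.mem_singleton] at hm
      have hai : a.toNat = i := by omega
      rw [hai] at h1
      exact Or.inl ⟨b.toNat, by omega, by omega, h1⟩
    · simp only [List.mem_singleton] at hm
      have hbi : b.toNat = i := by omega
      rw [hbi] at h1 h2
      exact Or.inr ⟨a.toNat, by omega, by omega, h2, Bool.eq_false_iff.mpr h1⟩
    · simp at hm
  · rintro (⟨j, hij, hjn, h1⟩ | ⟨j, hji, hjn, h1, h2⟩)
    · simp only [pvRI, List.mem_flatMap, PySem.List.mem_pyRange_one]
      refine ⟨(i : Int), ⟨by omega, by omega⟩, (j : Int), ⟨by omega, by omega⟩, ?_⟩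
      rw [pvG, pvW_eq ws (i : Int) (by omega) (by omega), pvW_eq ws (j : Int) (by omega) (by omega)]
      simp only [Int.toNat_natCast]
      rw [if_pos h1]
      simp
    · simp only [pvRI, List.mem_flatMap, PySem.List.mem_pyRange_one]
      refine ⟨(j : Int), ⟨by omega, by omega⟩, (i : Int), ⟨by omega, by omega⟩, ?_⟩
      rw [pvG, pvW_eq ws (i : Int) (by omega) (by omega), pvW_eq ws (j : Int) (by omega) (by omega)]
      simp only [Int.toNat_natCast]
      rw [if_neg (ne_true_of_eq_false h2), if_pos h1]
      simp

def pvDL (ws : List String) : Nat → PySem.Set String → List String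
  | 0, _ => []
  | m + 1, s =>
      (if !(s.contains (pvW ws m)) && !(pvBig ws m) then [pvW ws m] else []) ++
      pvDL ws m (s.add (pvW ws m))

def pvSA (ws : List String) : Nat → PySem.Set String → PySem.Set String
  | 0, s => s
  | m + 1, s => pvSA ws m (s.add (pvW ws m))

lemma pvB_fold (ws : List String) (m : Nat) (hm : m ≤ ws.length)
    (acc : List String) (s : PySem.Set String) :
    (PySem.List.pyRange ((m : Int) - 1) (-1) (-1)).foldl
      (fun (st : List String × PySem.Set String) i =>
        let w := PySem.List.pyGetD ws i ""
        (if !(st.2.contains w) &&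
            !(ws.any fun v => PySem.Str.isIn w v && decide (PySem.Str.len w < PySem.Str.len v))
         then st.1 ++ [w] else st.1,
         st.2.add w)) (acc, s) =
      (acc ++ pvDL ws m s, pvSA ws m s) := by
  induction m generalizing acc s with
  | zero =>
    rw [show ((0 : Nat) : Int) - 1 = -1 by norm_num,
      PySem.List.pyRange_neg_one_eq_nil (by norm_num)]
    simp [pvDL, pvSA]
  | succ m ih =>
    have hm' : m ≤ ws.length := by omega
    rw [show (((m + 1 : Nat)) : Int) - 1 = (m : Int) by push_cast; ring,
      PySem.List.pyRange_neg_one_cons (by omega), List.foldl_cons]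
    simp only [pvW_eq ws (m : Int) (by omega) (by omega), Int.toNat_natCast]
    rw [ih hm']
    simp only [pvDL, pvSA, pvBig]
    split_ifs <;> simp

lemma pvDup_last (ws : List String) (m : Nat) : pvDup ws m (m + 1) = false := by
  simp only [pvDup, List.any_eq_false, List.mem_range]
  intro j hj
  simp only [Bool.and_eq_true, decide_eq_true_eq, not_and]
  omega

lemma pvDL_reverse (ws : List String) (m : Nat) (s : PySem.Set String) :
    (pvDL ws m s).reverse =
      (List.range m).flatMap
        (fun i => if !(decide (pvW ws i ∈ s) || pvDup ws i m) && !(pvBig ws i)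
                  then [pvW ws i] else []) := by
  induction m generalizing s with
  | zero => simp [pvDL]
  | succ m ih =>
    rw [pvDL, List.reverse_append, ih (s.add (pvW ws m)), List.range_succ,
      List.flatMap_append]
    congr 1
    · refine List.flatMap_congr ?_
      intro i hi
      rw [List.mem_range] at hi
      congr 1
      rw [eq_iff_iff]
      simp only [Bool.and_eq_true, Bool.not_eq_true', Bool.or_eq_false_iff,
        decide_eq_false_iff_not, PySem.Set.mem_add, pvDup, List.any_eq_false,
        List.mem_range, Bool.and_eq_true, decide_eq_true_eq, beq_iff_eq, not_and,
        List.range_succ, List.mem_append, List.mem_singleton]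
      constructor
      · rintro ⟨⟨hmem, hdup⟩, hbig⟩
        refine ⟨⟨fun h => hmem (Or.inl h), ?_⟩, hbig⟩
        intro j hj
        rcases hj with hj | hj
        · exact hdup j hj
        · subst hj
          intro _ heq
          exact hmem (Or.inr heq.symm)
      · rintro ⟨⟨hmem, hdup⟩, hbig⟩
        refine ⟨⟨?_, fun j hj => hdup j (Or.inl hj)⟩, hbig⟩
        rintro (h | h)
        · exact hmem h
        · exact hdup m (Or.inr rfl) hi h.symm
    · simp only [List.flatMap_singleton, pvDup_last, Bool.or_false]
      have hc : decide (pvW ws m ∈ s) = s.contains (pvW ws m) := by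
        apply Bool.coe_iff_coe.mp
        simp
      rw [hc]
      split_ifs <;> simp

lemma pvB_eq (ws : List String) :
    duplication_removal_single_py_alt ws =
      (List.range ws.length).flatMap
        (fun i => if !(pvDup ws i ws.length) && !(pvBig ws i) then [pvW ws i] else []) := by
  simp only [duplication_removal_single_py_alt]
  rw [pvB_fold ws ws.length le_rfl [] PySem.Set.empty, List.nil_append, pvDL_reverse]
  refine List.flatMap_congr ?_
  intro i _
  simp [PySem.Set.empty]

lemma pvDup_iff (ws : List String) (i m : Nat) :
    pvDup ws i m = true ↔ ∃ j, i < j ∧ j < m ∧ pvW ws j = pvW ws i := by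
  simp only [pvDup, List.any_eq_true, List.mem_range, Bool.and_eq_true, decide_eq_true_eq,
    beq_iff_eq]
  constructor
  · rintro ⟨j, hjm, hij, he⟩; exact ⟨j, hij, hjm, he⟩
  · rintro ⟨j, hij, hjm, he⟩; exact ⟨j, hjm, hij, he⟩

lemma pvBig_iff (ws : List String) (i : Nat) :
    pvBig ws i = true ↔
      ∃ v ∈ ws, (pvW ws i).toList <:+: v.toList ∧ (pvW ws i).toList.length < v.toList.length := by
  simp [pvBig, List.any_eq_true, PySem.Chars.isIn_iff_infix, PySem.Str.len_eq,
    String.length_toList]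

lemma pvW_mem (ws : List String) (j : Nat) (hj : j < ws.length) : pvW ws j ∈ ws := by
  rw [pvW, List.getD_eq_getElem ws "" hj]
  exact List.getElem_mem hj

lemma pvRem_iff (ws : List String) (i : Nat) (hi : i < ws.length) :
    pvRemB ws i = (pvDup ws i ws.length || pvBig ws i) := by
  apply Bool.coe_iff_coe.mp
  have hf : ∀ a b : String, (PySem.Str.isIn a b = false) ↔ ¬ a.toList <:+: b.toList := by
    intro a b
    rw [Bool.eq_false_iff, Ne, PySem.Str.isIn_iff_infix]
  rw [pvRemB_iff, Bool.or_eq_true, pvDup_iff, pvBig_iff]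
  simp only [PySem.Str.isIn_iff_infix, hf]
  constructor
  · rintro (⟨j, hij, hjn, hin⟩ | ⟨j, hji, hjn, hin, hnin⟩)
    · by_cases heq : pvW ws j = pvW ws i
      · exact Or.inl ⟨j, hij, hjn, heq⟩
      · refine Or.inr ⟨pvW ws j, pvW_mem ws j hjn, hin, ?_⟩
        rcases lt_or_eq_of_le hin.length_le with h | h
        · exact h
        · exact absurd (String.toList_inj.mp (hin.sublist.eq_of_length h)).symm heq
    · refine Or.inr ⟨pvW ws j, pvW_mem ws j hjn, hin, ?_⟩
      rcases lt_or_eq_of_le hin.length_le with h | h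
      · exact h
      · exfalso
        apply hnin
        rw [← hin.sublist.eq_of_length h]
  · rintro (⟨j, hij, hjn, he⟩ | ⟨v, hv, hin, hlen⟩)
    · refine Or.inl ⟨j, hij, hjn, ?_⟩
      rw [he]
    · obtain ⟨p, hp, hpe⟩ := List.mem_iff_getElem.mp hv
      have hpv : pvW ws p = v := by rw [pvW, List.getD_eq_getElem ws "" hp, hpe]
      rcases Nat.lt_trichotomy p i with h | h | h
      · refine Or.inr ⟨p, h, hp, by rw [hpv]; exact hin, ?_⟩
        rw [hpv]
        intro hc
        have := hc.length_le
        omega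
      · subst h
        rw [← hpv] at hlen
        omega
      · exact Or.inl ⟨p, h, hp, by rw [hpv]; exact hin⟩

lemma pvA_eq (ws : List String) :
    duplication_removal_single_py ws =
      (List.range ws.length).flatMap
        (fun (i : Nat) => if ((i : Int) ∈ pvRI ws) then [] else [pvW ws i]) := by
  simp only [duplication_removal_single_py]
  have hinner : ∀ i : Int,
      (fun (ri : List Int) j =>
        if PySem.Str.isIn (PySem.List.pyGetD ws i "") (PySem.List.pyGetD ws j "") then ri ++ [i]
        else if PySem.Str.isIn (PySem.List.pyGetD ws j "") (PySem.List.pyGetD ws i "") then ri ++ [j]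
        else ri) =
      fun ri j => ri ++ pvG ws i j := by
    intro i; funext ri j; simp only [pvG]; split_ifs <;> simp
  have houter :
      (PySem.List.pyRange 0 (ws.length : Int) 1).foldl (fun ri i =>
        (PySem.List.pyRange (i + 1) (ws.length : Int) 1).foldl (fun ri j =>
          if PySem.Str.isIn (PySem.List.pyGetD ws i "") (PySem.List.pyGetD ws j "") then ri ++ [i]
          else if PySem.Str.isIn (PySem.List.pyGetD ws j "") (PySem.List.pyGetD ws i "") then ri ++ [j]
          else ri) ri) [] = pvRI ws := by
    have hstep : (fun (ri : List Int) (i : Int) =>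
        (PySem.List.pyRange (i + 1) (ws.length : Int) 1).foldl (fun ri j =>
          if PySem.Str.isIn (PySem.List.pyGetD ws i "") (PySem.List.pyGetD ws j "") then ri ++ [i]
          else if PySem.Str.isIn (PySem.List.pyGetD ws j "") (PySem.List.pyGetD ws i "") then ri ++ [j]
          else ri) ri) =
        fun ri i => ri ++ (PySem.List.pyRange (i + 1) (ws.length : Int) 1).flatMap (pvG ws i) := by
      funext ri i
      rw [hinner i, PySem.List.foldl_append_eq_flatMap]
    rw [hstep, PySem.List.foldl_append_eq_flatMap, pvRI, List.nil_append]
  rw [houter]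
  have hres : (fun (res : List String) (i : Int) =>
      if i ∈ pvRI ws then res else res ++ [PySem.List.pyGetD ws i ""]) =
      fun res i => res ++ (if i ∈ pvRI ws then [] else [PySem.List.pyGetD ws i ""]) := by
    funext res i; split_ifs <;> simp
  rw [hres, PySem.List.foldl_append_eq_flatMap, List.nil_append,
      PySem.List.pyRange_zero_nat, List.flatMap_map]
  refine List.flatMap_congr ?_
  intro i hi
  rw [List.mem_range] at hi
  simp [pvW, PySem.List.pyGetD_natCast]


-- ===== VERDICT (by name: the statement is the Claim_ definition above) =====
theorem duplication_removal_single_py_spec : Claim_equal_duplication_removal_single_py := by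
  intro ws _
  unfold Spec_duplication_removal_single_py
  rw [pvA_eq, pvB_eq]
  apply List.flatMap_congr
  intro i hi
  rw [List.mem_range] at hi
  by_cases h : pvRemB ws i = true
  · rw [if_pos ((pvRI_mem ws i hi).2 h)]
    rw [pvRem_iff ws i hi] at h
    simp only [Bool.or_eq_true] at h
    rcases h with h | h <;> simp [h]
  · rw [if_neg (fun hm => h ((pvRI_mem ws i hi).1 hm))]
    rw [pvRem_iff ws i hi] at h
    simp only [Bool.or_eq_true] at h
    push Not at h
    simp [h.1, h.2]
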